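-- pv_equiv track=rewrite | github.com/McElyea/Orket | scripts/evaluate_odr_calibration_bundle.py | _round_label
-- ===== SOURCE A (Python) =====
-- DELTA_PRECEDENCE = (
--     "constraint_conflict",
--     "scope_creep",
--     "constraint_remove",
--     "constraint_add",
--     "constraint_modify",
--     "rewrite_same_semantics",
--     "formatting_only",
--     "no_change",
-- )
--
-- def _round_label(section_labels: dict[str, str], conflict_active: bool) -> str:
--     if conflict_active:
--         return "constraint_conflict"
--     labels = set(section_labels.values())
--     for label in DELTA_PRECEDENCE:
--         if label in labels:
--             return label
--     return "no_change"
-- ===== SOURCE B (Python) =====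
-- DELTA_PRECEDENCE = (
--     "constraint_conflict",
--     "scope_creep",
--     "constraint_remove",
--     "constraint_add",
--     "constraint_modify",
--     "rewrite_same_semantics",
--     "formatting_only",
--     "no_change",
-- )
--
-- _RANK = {label: i for i, label in enumerate(DELTA_PRECEDENCE)}
--
-- def _round_label(section_labels: dict[str, str], conflict_active: bool) -> str:
--     if conflict_active:
--         return "constraint_conflict"
--     best = None
--     for v in section_labels.values():
--         r = _RANK.get(v)
--         if r is not None and (best is None or r < best):
--             best = r
--     return DELTA_PRECEDENCE[best] if best is not None else "no_change"
-- ===== Notes on version B (the rewrite author's own statement) =====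
-- stated objective: alternative
-- what changed: Instead of building a set of the values and scanning the precedence tuple for the first member, B builds a label->rank dict once and makes a single pass over the values tracking the minimum rank, returning DELTA_PRECEDENCE[min_rank] (or 'no_change' if no known label occurs).
import Mathlib
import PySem

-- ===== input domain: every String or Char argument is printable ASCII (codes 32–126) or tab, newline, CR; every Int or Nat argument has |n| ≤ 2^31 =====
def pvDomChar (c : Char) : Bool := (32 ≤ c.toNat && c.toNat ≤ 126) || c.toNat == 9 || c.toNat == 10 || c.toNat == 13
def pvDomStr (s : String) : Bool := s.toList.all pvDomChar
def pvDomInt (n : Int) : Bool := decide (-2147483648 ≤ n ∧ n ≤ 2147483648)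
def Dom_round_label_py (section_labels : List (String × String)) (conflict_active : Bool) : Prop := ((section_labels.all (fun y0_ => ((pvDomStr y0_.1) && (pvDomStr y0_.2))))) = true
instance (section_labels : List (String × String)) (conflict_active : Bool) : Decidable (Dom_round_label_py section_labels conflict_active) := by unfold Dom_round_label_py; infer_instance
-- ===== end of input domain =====

-- B replaces A's scan of the precedence tuple over a set of the values by one pass over the
-- values tracking the minimum precedence rank via a label->rank dict (alternative decomposition,
-- same result; equivalence of the RETURN value is what is proved).

-- ===== PORT A =====
def deltaPrecedence : List String :=
  ["constraint_conflict", "scope_creep", "constraint_remove", "constraint_add",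
   "constraint_modify", "rewrite_same_semantics", "formatting_only", "no_change"]

-- A's 'for label in DELTA_PRECEDENCE: if label in labels: return label' loop
def roundLabelLoop (labels : PySem.Set String) : List String → String
  | [] => "no_change"
  | l :: rest => if PySem.Set.contains labels l then l else roundLabelLoop labels rest

def round_label_py (section_labels : List (String × String)) (conflict_active : Bool) : String :=
  if conflict_active then "constraint_conflict"
  else
    let labels := PySem.Set.ofList (PySem.Dict.values (PySem.Dict.ofList section_labels))
    roundLabelLoop labels deltaPrecedence

-- ===== PORT B =====
-- _RANK = {label: i for i, label in enumerate(DELTA_PRECEDENCE)}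
def rankDict : PySem.Dict String Nat :=
  PySem.Dict.ofList ((PySem.List.enumerate deltaPrecedence).map (fun p => (p.2, p.1.toNat)))

-- body of B's single 'for v in section_labels.values()' loop
def bestStep (best : Option Nat) (v : String) : Option Nat :=
  match PySem.Dict.get? rankDict v with
  | none => best
  | some r =>
    match best with
    | none => some r
    | some b => if r < b then some r else some b

def round_label_py_alt (section_labels : List (String × String)) (conflict_active : Bool) : String :=
  if conflict_active then "constraint_conflict"
  else
    match (PySem.Dict.values (PySem.Dict.ofList section_labels)).foldl bestStep none with
    | some b => deltaPrecedence.getD b "no_change"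
    | none => "no_change"

-- ===== PRECONDITION & SPEC =====
def Spec_round_label_py (section_labels : List (String × String)) (conflict_active : Bool) (out : String) : Prop := out = round_label_py_alt section_labels conflict_active
instance (section_labels : List (String × String)) (conflict_active : Bool) (out : String) : Decidable (Spec_round_label_py section_labels conflict_active out) := by unfold Spec_round_label_py; infer_instance

-- ===== CLAIM (what is proved, stated in full; the proofs are below) =====
def Claim_equal_round_label_py : Prop := ∀ (section_labels : List (String × String)) (conflict_active : Bool), Dom_round_label_py section_labels conflict_active → Spec_round_label_py section_labels conflict_active (round_label_py section_labels conflict_active)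

-- ===== LEMMAS AND PROOFS =====

theorem rankDict_mk : rankDict = PySem.Dict.mk
    [("constraint_conflict", 0), ("scope_creep", 1), ("constraint_remove", 2),
     ("constraint_add", 3), ("constraint_modify", 4), ("rewrite_same_semantics", 5),
     ("formatting_only", 6), ("no_change", 7)] := by decide

-- the rank lookup, evaluated
theorem rk_eq (v : String) : PySem.Dict.get? rankDict v =
    if "constraint_conflict" = v then some 0
    else if "scope_creep" = v then some 1
    else if "constraint_remove" = v then some 2
    else if "constraint_add" = v then some 3
    else if "constraint_modify" = v then some 4
    else if "rewrite_same_semantics" = v then some 5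
    else if "formatting_only" = v then some 6
    else if "no_change" = v then some 7
    else none := by
  rw [rankDict_mk]
  simp only [PySem.Dict.get?_mk_cons, beq_iff_eq]
  split_ifs <;> rfl

theorem rk_some {v : String} {r : Nat} (h : PySem.Dict.get? rankDict v = some r) :
    r < 8 ∧ v = deltaPrecedence.getD r "" := by
  rw [rk_eq] at h
  split_ifs at h with c1 c2 c3 c4 c5 c6 c7 c8
  · injection h with h2; subst h2; exact ⟨by norm_num, by rw [← c1]; decide⟩
  · injection h with h2; subst h2; exact ⟨by norm_num, by rw [← c2]; decide⟩
  · injection h with h2; subst h2; exact ⟨by norm_num, by rw [← c3]; decide⟩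
  · injection h with h2; subst h2; exact ⟨by norm_num, by rw [← c4]; decide⟩
  · injection h with h2; subst h2; exact ⟨by norm_num, by rw [← c5]; decide⟩
  · injection h with h2; subst h2; exact ⟨by norm_num, by rw [← c6]; decide⟩
  · injection h with h2; subst h2; exact ⟨by norm_num, by rw [← c7]; decide⟩
  · injection h with h2; subst h2; exact ⟨by norm_num, by rw [← c8]; decide⟩

theorem rk_delta {i : Nat} (h : i < 8) :
    PySem.Dict.get? rankDict (deltaPrecedence.getD i "") = some i := by
  interval_cases i <;> rw [rk_eq] <;> decide

theorem bestStep_rk_none {v : String} (b : Option Nat)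
    (h : PySem.Dict.get? rankDict v = none) : bestStep b v = b := by
  unfold bestStep; rw [h]

theorem bestStep_rk_some_none {v : String} {r : Nat}
    (h : PySem.Dict.get? rankDict v = some r) : bestStep none v = some r := by
  unfold bestStep; rw [h]

theorem bestStep_rk_some_some {v : String} {r : Nat} (b : Nat)
    (h : PySem.Dict.get? rankDict v = some r) :
    bestStep (some b) v = some (if r < b then r else b) := by
  unfold bestStep; rw [h]
  by_cases hc : r < b <;> simp [hc]

theorem fold_none {vals : List String} {acc : Option Nat}
    (h : vals.foldl bestStep acc = none) :
    acc = none ∧ ∀ v ∈ vals, PySem.Dict.get? rankDict v = none := by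
  induction vals generalizing acc with
  | nil => simpa using h
  | cons x xs ih =>
    simp only [List.foldl_cons] at h
    obtain ⟨h1, h2⟩ := ih h
    have hx : PySem.Dict.get? rankDict x = none ∧ acc = none := by
      cases hrk : PySem.Dict.get? rankDict x with
      | none => rw [bestStep_rk_none _ hrk] at h1; exact ⟨rfl, h1⟩
      | some r =>
        cases acc with
        | none => rw [bestStep_rk_some_none hrk] at h1; cases h1
        | some a => rw [bestStep_rk_some_some _ hrk] at h1; cases h1
    refine ⟨hx.2, ?_⟩
    intro v hv
    rw [List.mem_cons] at hv
    rcases hv with rfl | hv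
    · exact hx.1
    · exact h2 v hv

theorem fold_some_mem {vals : List String} {acc : Option Nat} {b : Nat}
    (h : vals.foldl bestStep acc = some b) :
    acc = some b ∨ ∃ v ∈ vals, PySem.Dict.get? rankDict v = some b := by
  induction vals generalizing acc with
  | nil =>
    simp only [List.foldl_nil] at h
    exact Or.inl h
  | cons x xs ih =>
    simp only [List.foldl_cons] at h
    rcases ih h with h1 | ⟨v, hv, hr⟩
    · cases hrk : PySem.Dict.get? rankDict x with
      | none => rw [bestStep_rk_none _ hrk] at h1; exact Or.inl h1
      | some r =>
        cases acc with
        | none =>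
          rw [bestStep_rk_some_none hrk] at h1
          right; exact ⟨x, List.mem_cons_self .., by rw [hrk, h1]⟩
        | some a =>
          rw [bestStep_rk_some_some _ hrk] at h1
          injection h1 with h1
          by_cases hlt : r < a
          · right; refine ⟨x, List.mem_cons_self .., ?_⟩
            rw [hrk]; simp [if_pos hlt] at h1; rw [h1]
          · left; simp [if_neg hlt] at h1; rw [h1]
    · exact Or.inr ⟨v, List.mem_cons_of_mem _ hv, hr⟩

theorem fold_min {vals : List String} {acc : Option Nat} {b : Nat}
    (h : vals.foldl bestStep acc = some b) :
    (∀ v ∈ vals, ∀ r, PySem.Dict.get? rankDict v = some r → b ≤ r) ∧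
    (∀ a, acc = some a → b ≤ a) := by
  induction vals generalizing acc with
  | nil =>
    simp only [List.foldl_nil] at h
    exact ⟨by simp, fun a ha => by rw [h] at ha; injection ha with ha; omega⟩
  | cons x xs ih =>
    simp only [List.foldl_cons] at h
    obtain ⟨h1, hstep⟩ := ih h
    constructor
    · intro v hv r hr
      rw [List.mem_cons] at hv
      rcases hv with rfl | hv
      · cases acc with
        | none => exact hstep r (bestStep_rk_some_none hr)
        | some a =>
          have := hstep _ (bestStep_rk_some_some a hr)
          split_ifs at this <;> omega
      · exact h1 v hv r hr
    · intro a ha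
      subst ha
      cases hrk : PySem.Dict.get? rankDict x with
      | none => exact hstep a (bestStep_rk_none _ hrk)
      | some r =>
        have := hstep _ (bestStep_rk_some_some a hrk)
        split_ifs at this <;> omega

-- the core: for any list of values, A's precedence scan equals B's min-rank pass
theorem core (vals : List String) :
    roundLabelLoop (PySem.Set.ofList vals) deltaPrecedence =
      (match vals.foldl bestStep none with
       | some b => deltaPrecedence.getD b "no_change"
       | none => "no_change") := by
  cases hb : vals.foldl bestStep none with
  | none =>
    obtain ⟨-, hall⟩ := fold_none hb
    have hnm : ∀ i : Nat, i < 8 → (deltaPrecedence.getD i "") ∉ vals := by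
      intro i hi hmem
      have := hall _ hmem
      rw [rk_delta hi] at this; cases this
    have h0 := hnm 0 (by norm_num); have h1 := hnm 1 (by norm_num)
    have h2 := hnm 2 (by norm_num); have h3 := hnm 3 (by norm_num)
    have h4 := hnm 4 (by norm_num); have h5 := hnm 5 (by norm_num)
    have h6 := hnm 6 (by norm_num); have h7 := hnm 7 (by norm_num)
    simp only [deltaPrecedence, List.getD, List.getElem?_cons_zero, List.getElem?_cons_succ,
      Option.getD_some] at h0 h1 h2 h3 h4 h5 h6 h7
    simp [deltaPrecedence, roundLabelLoop, h0, h1, h2, h3, h4, h5, h6, h7]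
  | some b =>
    have hmem : (deltaPrecedence.getD b "") ∈ vals := by
      rcases fold_some_mem hb with h | ⟨v, hv, hr⟩
      · cases h
      · obtain ⟨-, rfl⟩ := rk_some hr; exact hv
    have hb8 : b < 8 := by
      rcases fold_some_mem hb with h | ⟨v, hv, hr⟩
      · cases h
      · exact (rk_some hr).1
    have hlt : ∀ i : Nat, i < b → (deltaPrecedence.getD i "") ∉ vals := by
      intro i hib hmemi
      have := (fold_min hb).1 _ hmemi i (rk_delta (by omega))
      omega
    show roundLabelLoop (PySem.Set.ofList vals) deltaPrecedence = deltaPrecedence.getD b "no_change"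
    interval_cases b
    · 
      simp only [deltaPrecedence, List.getD, List.getElem?_cons_zero, List.getElem?_cons_succ,
          Option.getD_some] at hmem ⊢
      simp [roundLabelLoop, hmem]
    · have h0 := hlt 0 (by norm_num); 
      simp only [deltaPrecedence, List.getD, List.getElem?_cons_zero, List.getElem?_cons_succ,
          Option.getD_some] at hmem h0 ⊢
      simp [roundLabelLoop, hmem, h0]
    · have h0 := hlt 0 (by norm_num); have h1 := hlt 1 (by norm_num); 
      simp only [deltaPrecedence, List.getD, List.getElem?_cons_zero, List.getElem?_cons_succ,
          Option.getD_some] at hmem h0 h1 ⊢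
      simp [roundLabelLoop, hmem, h0, h1]
    · have h0 := hlt 0 (by norm_num); have h1 := hlt 1 (by norm_num); have h2 := hlt 2 (by norm_num); 
      simp only [deltaPrecedence, List.getD, List.getElem?_cons_zero, List.getElem?_cons_succ,
          Option.getD_some] at hmem h0 h1 h2 ⊢
      simp [roundLabelLoop, hmem, h0, h1, h2]
    · have h0 := hlt 0 (by norm_num); have h1 := hlt 1 (by norm_num); have h2 := hlt 2 (by norm_num); have h3 := hlt 3 (by norm_num); 
      simp only [deltaPrecedence, List.getD, List.getElem?_cons_zero, List.getElem?_cons_succ,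
          Option.getD_some] at hmem h0 h1 h2 h3 ⊢
      simp [roundLabelLoop, hmem, h0, h1, h2, h3]
    · have h0 := hlt 0 (by norm_num); have h1 := hlt 1 (by norm_num); have h2 := hlt 2 (by norm_num); have h3 := hlt 3 (by norm_num); have h4 := hlt 4 (by norm_num); 
      simp only [deltaPrecedence, List.getD, List.getElem?_cons_zero, List.getElem?_cons_succ,
          Option.getD_some] at hmem h0 h1 h2 h3 h4 ⊢
      simp [roundLabelLoop, hmem, h0, h1, h2, h3, h4]
    · have h0 := hlt 0 (by norm_num); have h1 := hlt 1 (by norm_num); have h2 := hlt 2 (by norm_num); have h3 := hlt 3 (by norm_num); have h4 := hlt 4 (by norm_num); have h5 := hlt 5 (by norm_num); 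
      simp only [deltaPrecedence, List.getD, List.getElem?_cons_zero, List.getElem?_cons_succ,
          Option.getD_some] at hmem h0 h1 h2 h3 h4 h5 ⊢
      simp [roundLabelLoop, hmem, h0, h1, h2, h3, h4, h5]
    · have h0 := hlt 0 (by norm_num); have h1 := hlt 1 (by norm_num); have h2 := hlt 2 (by norm_num); have h3 := hlt 3 (by norm_num); have h4 := hlt 4 (by norm_num); have h5 := hlt 5 (by norm_num); have h6 := hlt 6 (by norm_num); 
      simp only [deltaPrecedence, List.getD, List.getElem?_cons_zero, List.getElem?_cons_succ,
          Option.getD_some] at hmem h0 h1 h2 h3 h4 h5 h6 ⊢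
      simp [roundLabelLoop, hmem, h0, h1, h2, h3, h4, h5, h6]

-- ===== VERDICT (by name: the statement is the Claim_ definition above) =====
theorem round_label_py_spec : Claim_equal_round_label_py := by
  intro sl ca _
  unfold Spec_round_label_py round_label_py round_label_py_alt
  cases ca with
  | true => rfl
  | false => simpa using core (PySem.Dict.values (PySem.Dict.ofList sl))
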